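-- pv_equiv track=rewrite | github.com/kfuku52/cdskit | cdskit/maxalign.py | codon_sites_to_nucleotide_ranges
-- ===== SOURCE A (Python) =====
-- def codon_sites_to_nucleotide_ranges(codon_site_indices):
--     if len(codon_site_indices) == 0:
--         return list()
--     ranges = list()
--     run_start = codon_site_indices[0]
--     run_end = codon_site_indices[0]
--     for site in codon_site_indices[1:]:
--         if site == run_end + 1:
--             run_end = site
--             continue
--         ranges.append((run_start * 3, (run_end + 1) * 3))
--         run_start = site
--         run_end = site
--     ranges.append((run_start * 3, (run_end + 1) * 3))
--     return ranges
-- ===== SOURCE B (Python) =====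
-- def codon_sites_to_nucleotide_ranges(codon_site_indices):
--     # Build the ranges back-to-front: scan the sites right-to-left and extend the
--     # most recently created range (kept last in rev_ranges) whenever the current
--     # site immediately precedes its start; reverse once at the end.
--     rev_ranges = []
--     for site in reversed(codon_site_indices):
--         if rev_ranges and rev_ranges[-1][0] == (site + 1) * 3:
--             rev_ranges[-1] = (site * 3, rev_ranges[-1][1])
--         else:
--             rev_ranges.append((site * 3, (site + 1) * 3))
--     return rev_ranges[::-1]
-- ===== Notes on version B (the rewrite author's own statement) =====
-- stated objective: alternative
-- what changed: B traverses the sites right-to-left and builds the output back-to-front by extending the start of the most recently created range when the site abuts it, instead of A's left-to-right run_start/run_end state machine with a trailing flush append.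
import Mathlib
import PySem

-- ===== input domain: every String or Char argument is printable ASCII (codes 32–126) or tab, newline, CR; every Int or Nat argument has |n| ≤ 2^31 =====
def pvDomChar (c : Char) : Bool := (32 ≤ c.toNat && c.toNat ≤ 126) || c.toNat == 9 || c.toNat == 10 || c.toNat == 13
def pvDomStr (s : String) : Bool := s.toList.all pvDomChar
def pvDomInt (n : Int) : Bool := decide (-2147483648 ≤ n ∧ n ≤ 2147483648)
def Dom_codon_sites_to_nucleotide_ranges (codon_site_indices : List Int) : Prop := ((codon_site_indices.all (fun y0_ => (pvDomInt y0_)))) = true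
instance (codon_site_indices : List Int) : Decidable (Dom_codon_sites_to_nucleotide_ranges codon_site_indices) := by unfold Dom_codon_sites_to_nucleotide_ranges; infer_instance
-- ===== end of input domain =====

-- B builds the ranges back-to-front (right-to-left scan extending the newest range) instead of A's left-to-right run-state loop; alternative decomposition, same cost.


-- ===== PORT A =====
-- the for-loop with state (ranges, run_start, run_end), plus the trailing flush append
def pvLoopA : List Int → List (Int × Int) → Int → Int → List (Int × Int)
  | [], ranges, run_start, run_end => ranges ++ [(run_start * 3, (run_end + 1) * 3)]
  | site :: rest, ranges, run_start, run_end =>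
    if site = run_end + 1 then pvLoopA rest ranges run_start site
    else pvLoopA rest (ranges ++ [(run_start * 3, (run_end + 1) * 3)]) site site

def codon_sites_to_nucleotide_ranges : List Int → List (Int × Int)
  | [] => []
  | x :: rest => pvLoopA rest [] x x

-- ===== PORT B =====
-- loop body: rev_ranges[-1] is getLast?, in-place update of the last entry, append otherwise
def pvStepB (rev_ranges : List (Int × Int)) (site : Int) : List (Int × Int) :=
  match rev_ranges.getLast? with
  | some (a, b) =>
    if a = (site + 1) * 3 then rev_ranges.dropLast ++ [(site * 3, b)]
    else rev_ranges ++ [(site * 3, (site + 1) * 3)]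
  | none => [(site * 3, (site + 1) * 3)]

def codon_sites_to_nucleotide_ranges_alt (codon_site_indices : List Int) : List (Int × Int) :=
  ((codon_site_indices.reverse).foldl pvStepB []).reverse

-- ===== PRECONDITION & SPEC =====
def Spec_codon_sites_to_nucleotide_ranges (codon_site_indices : List Int) (out : List (Int × Int)) : Prop := out = codon_sites_to_nucleotide_ranges_alt codon_site_indices
instance (codon_site_indices : List Int) (out : List (Int × Int)) : Decidable (Spec_codon_sites_to_nucleotide_ranges codon_site_indices out) := by unfold Spec_codon_sites_to_nucleotide_ranges; infer_instance

-- ===== CLAIM (what is proved, stated in full; the proofs are below) =====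
def Claim_equal_codon_sites_to_nucleotide_ranges : Prop := ∀ (codon_site_indices : List Int), Dom_codon_sites_to_nucleotide_ranges codon_site_indices → Spec_codon_sites_to_nucleotide_ranges codon_site_indices (codon_sites_to_nucleotide_ranges codon_site_indices)

-- ===== LEMMAS AND PROOFS =====

-- merge a pending run [rs..re] into a front-built range list
def pvComb (rs re : Int) (l : List (Int × Int)) : List (Int × Int) :=
  match l with
  | (a, b) :: t => if a = (re + 1) * 3 then (rs * 3, b) :: t else (rs * 3, (re + 1) * 3) :: (a, b) :: t
  | [] => [(rs * 3, (re + 1) * 3)]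

theorem pvStepB_reverse (m : List (Int × Int)) (s : Int) :
    pvStepB m.reverse s = (pvComb s s m).reverse := by
  cases m with
  | nil => simp [pvStepB, pvComb]
  | cons p t =>
    obtain ⟨a, b⟩ := p
    simp [pvStepB, pvComb, List.getLast?_concat]
    split_ifs <;> simp

theorem foldl_stepB (ys : List Int) (m : List (Int × Int)) :
    ys.foldl pvStepB m.reverse = (ys.foldl (fun acc s => pvComb s s acc) m).reverse := by
  induction ys generalizing m with
  | nil => simp
  | cons s ys ih => simpa [pvStepB_reverse] using ih (pvComb s s m)

theorem alt_eq_foldr (xs : List Int) :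
    codon_sites_to_nucleotide_ranges_alt xs = xs.foldr (fun s acc => pvComb s s acc) [] := by
  have h := foldl_stepB xs.reverse ([] : List (Int × Int))
  simp only [List.reverse_nil] at h
  simp [codon_sites_to_nucleotide_ranges_alt, h, List.foldl_reverse]

theorem comb_head (s : Int) (L : List (Int × Int)) :
    ∃ b t, pvComb s s L = (s * 3, b) :: t := by
  cases L with
  | nil => exact ⟨(s + 1) * 3, [], rfl⟩
  | cons p t =>
    obtain ⟨a, c⟩ := p
    by_cases h : a = (s + 1) * 3
    · exact ⟨c, t, by simp [pvComb, h]⟩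
    · exact ⟨(s + 1) * 3, (a, c) :: t, by simp [pvComb, h]⟩

theorem comb_comb (rs re s : Int) (L : List (Int × Int)) (h : s = re + 1) :
    pvComb rs re (pvComb s s L) = pvComb rs s L := by
  subst h
  cases L with
  | nil => simp [pvComb]
  | cons p t =>
    obtain ⟨a, c⟩ := p
    by_cases h : a = (re + 1 + 1) * 3 <;> simp [pvComb, h]

theorem comb_new (rs re s : Int) (L : List (Int × Int)) (h : ¬ s = re + 1) :
    pvComb rs re (pvComb s s L) = (rs * 3, (re + 1) * 3) :: pvComb s s L := by
  obtain ⟨b, t, hb⟩ := comb_head s L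
  rw [hb]
  have : ¬ s * 3 = (re + 1) * 3 := by omega
  simp [pvComb, this]

theorem loopA_eq (rest : List Int) :
    ∀ (ranges : List (Int × Int)) (rs re : Int),
      pvLoopA rest ranges rs re = ranges ++ pvComb rs re (rest.foldr (fun s acc => pvComb s s acc) []) := by
  induction rest with
  | nil => intro ranges rs re; simp [pvLoopA, pvComb]
  | cons s rest ih =>
    intro ranges rs re
    by_cases h : s = re + 1
    · have e1 : pvLoopA (s :: rest) ranges rs re = pvLoopA rest ranges rs s := by
        simp [pvLoopA, h]
      rw [e1, ih, List.foldr_cons, comb_comb rs re s _ h]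
    · simp [pvLoopA, h, ih, comb_new rs re s _ h]

-- ===== VERDICT (by name: the statement is the Claim_ definition above) =====
theorem codon_sites_to_nucleotide_ranges_spec : Claim_equal_codon_sites_to_nucleotide_ranges := by
  intro xs _
  show codon_sites_to_nucleotide_ranges xs = codon_sites_to_nucleotide_ranges_alt xs
  rw [alt_eq_foldr]
  cases xs with
  | nil => rfl
  | cons x rest => simp [codon_sites_to_nucleotide_ranges, loopA_eq]
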